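-- pv_equiv track=rewrite | github.com/datawhalechina/huawei-od-python | codes/others100/166_the-area-for-intersect-rectangles.py | solve_method
-- ===== SOURCE A (Python) =====
-- def solve_method(areas):
--     new_points = []
--     # 后面两个坐标转化成正常值（变成右下角坐标点）
--     for area in areas:
--         x, y, w, h = area
--         new_points.append([x, y, x + w, y - h])
--
--     # 初始化一个空的相交区域为原点，记录它的左上角和右下角的坐标值
--     inter_area = []
--
--     # 将所有的area，每个坐标通过zip函数分别集合到一起，
--     # 比如三个area的左上x，左上y，右下x，右下y
--     # 按照如下规则进行查找，然后能找到满足最小的矩形。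
--     # 找左上x里的较大值（注意坐标系左负右正，上正下负），即靠右，
--     # 找左上y里的较小值，即靠下，
--     # 找右下x里的较小值，即靠左，
--     # 找右下y里的较大值，即靠上，
--     # 这四个极值找到后就是重叠区域的左上和右下坐标。
--     for ind, coro in enumerate(zip(*new_points)):
--         if ind == 0 or ind == 3:
--             inter_area.append(max(coro))
--         if ind == 1 or ind == 2:
--             inter_area.append(min(coro))
--
--     # 右下x一定大于左上x，左上y一定大于右下y，否则不存在相交区域
--     # 如果不相交，也会求取一个面积，为他们最近点围成的面积，需要去掉这个不相交的面积，
--     # 如果下面两个条件任意一个小于等于0，则表示不相交。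
--     if (inter_area[2] - inter_area[0]) <= 0 or (inter_area[1] - inter_area[3]) <= 0:
--         return 0
--     else:
--         return (inter_area[2] - inter_area[0]) * (inter_area[1] - inter_area[3])
-- ===== SOURCE B (Python) =====
-- def solve_method(areas):
--     x, y, w, h = areas[0]
--     left, top, right, bottom = x, y, x + w, y - h
--     for x, y, w, h in areas[1:]:
--         left = max(left, x)
--         top = min(top, y)
--         right = min(right, x + w)
--         bottom = max(bottom, y - h)
--     if right - left <= 0 or top - bottom <= 0:
--         return 0
--     return (right - left) * (top - bottom)
-- ===== Notes on version B (the rewrite author's own statement) =====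
-- stated objective: simpler
-- what changed: Single pass keeping four scalar accumulators (left/top/right/bottom) seeded from the first rectangle, instead of building a converted-points list, transposing with zip, and taking max/min of each column.
import Mathlib
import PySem

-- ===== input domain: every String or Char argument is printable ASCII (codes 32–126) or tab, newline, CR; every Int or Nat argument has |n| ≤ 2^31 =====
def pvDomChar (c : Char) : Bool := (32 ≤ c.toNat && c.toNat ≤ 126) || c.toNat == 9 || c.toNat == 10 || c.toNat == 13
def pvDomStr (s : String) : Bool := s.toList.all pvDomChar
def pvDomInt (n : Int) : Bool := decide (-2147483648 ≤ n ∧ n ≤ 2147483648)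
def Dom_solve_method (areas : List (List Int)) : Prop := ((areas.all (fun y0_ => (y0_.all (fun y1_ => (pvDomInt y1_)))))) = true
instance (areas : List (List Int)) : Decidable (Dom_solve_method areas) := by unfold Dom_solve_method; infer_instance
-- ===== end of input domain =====

-- B single-pass fold with four scalar accumulators replaces A's converted-points list + zip transpose + column max/min; return value equivalence on nonempty lists of 4-element rows (A raises IndexError/ValueError elsewhere).

-- ===== PORT A =====
-- `x, y, w, h = area` ported with getD (Pre_ guarantees length 4, where Python would not raise)
def pvRowConv (a : List Int) : List Int :=
  let x := a.getD 0 0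
  let y := a.getD 1 0
  let w := a.getD 2 0
  let h := a.getD 3 0
  [x, y, x + w, y - h]

-- zip(*new_points) with ind-th tuple = ind-th coordinate of every row (rows all have length 4 under Pre_)
def solve_method (areas : List (List Int)) : Int :=
  let new_points := areas.foldl (fun acc a => acc ++ [pvRowConv a]) []
  let inter0 := (PySem.List.max? (new_points.map (fun p => p.getD 0 0)) (fun y => y)).getD 0
  let inter1 := (PySem.List.min? (new_points.map (fun p => p.getD 1 0)) (fun y => y)).getD 0
  let inter2 := (PySem.List.min? (new_points.map (fun p => p.getD 2 0)) (fun y => y)).getD 0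
  let inter3 := (PySem.List.max? (new_points.map (fun p => p.getD 3 0)) (fun y => y)).getD 0
  if inter2 - inter0 ≤ 0 ∨ inter1 - inter3 ≤ 0 then 0
  else (inter2 - inter0) * (inter1 - inter3)

-- ===== PORT B =====
def pvBStep (s : Int × Int × Int × Int) (a : List Int) : Int × Int × Int × Int :=
  (max s.1 (a.getD 0 0), min s.2.1 (a.getD 1 0),
   min s.2.2.1 (a.getD 0 0 + a.getD 2 0), max s.2.2.2 (a.getD 1 0 - a.getD 3 0))

def solve_method_alt (areas : List (List Int)) : Int :=
  match areas with
  | [] => 0   -- Python B raises IndexError here (outside Pre_)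
  | a0 :: rest =>
    let s := rest.foldl pvBStep
      (a0.getD 0 0, a0.getD 1 0, a0.getD 0 0 + a0.getD 2 0, a0.getD 1 0 - a0.getD 3 0)
    if s.2.2.1 - s.1 ≤ 0 ∨ s.2.1 - s.2.2.2 ≤ 0 then 0
    else (s.2.2.1 - s.1) * (s.2.1 - s.2.2.2)

-- ===== PRECONDITION & SPEC =====
-- Pre_ excludes exactly the inputs where Python A raises: the empty list (IndexError on
-- inter_area[2]) and rows whose length is not 4 (ValueError on unpacking).
def Pre_solve_method (areas : List (List Int)) : Prop :=
  areas ≠ [] ∧ ∀ a ∈ areas, a.length = 4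
instance (areas : List (List Int)) : Decidable (Pre_solve_method areas) := by
  unfold Pre_solve_method; infer_instance
def pvWitness_solve_method : List (List Int) := [[0, 5, 4, 4], [2, 6, 4, 4]]

def Spec_solve_method (areas : List (List Int)) (out : Int) : Prop := out = solve_method_alt areas
instance (areas : List (List Int)) (out : Int) : Decidable (Spec_solve_method areas out) := by unfold Spec_solve_method; infer_instance

-- ===== CLAIM (what is proved, stated in full; the proofs are below) =====
def Claim_equal_solve_method : Prop := ∀ (areas : List (List Int)), Dom_solve_method areas → Pre_solve_method areas → Spec_solve_method areas (solve_method areas)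

-- ===== LEMMAS AND PROOFS =====

theorem pv_foldl_append_map (areas : List (List Int)) (l : List (List Int)) :
    areas.foldl (fun acc a => acc ++ [pvRowConv a]) l = l ++ areas.map pvRowConv := by
  induction areas generalizing l with
  | nil => simp
  | cons a t ih => simp [List.foldl, ih]

theorem pv_fold_tuple (rest : List (List Int)) (l t r b : Int) :
    rest.foldl pvBStep (l, t, r, b) =
      ((rest.map (fun a => a.getD 0 0)).foldl max l,
       (rest.map (fun a => a.getD 1 0)).foldl min t,
       (rest.map (fun a => a.getD 0 0 + a.getD 2 0)).foldl min r,
       (rest.map (fun a => a.getD 1 0 - a.getD 3 0)).foldl max b) := by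
  induction rest generalizing l t r b with
  | nil => rfl
  | cons a rs ih => simp [List.foldl, pvBStep, ih]

-- ===== VERDICT (by name: the statement is the Claim_ definition above) =====

theorem solve_method_spec : Claim_equal_solve_method := by
  intro areas _ hpre
  obtain ⟨hne, _⟩ := hpre
  unfold Spec_solve_method
  match areas with
  | [] => exact absurd rfl hne
  | a0 :: rest =>
    show solve_method (a0 :: rest) = solve_method_alt (a0 :: rest)
    unfold solve_method solve_method_alt
    simp only [pv_foldl_append_map, pv_fold_tuple, List.nil_append, List.map_cons, List.map_map, PySem.List.max?_id_cons,
      PySem.List.min?_id_cons, Option.getD_some]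
    have h0 : ∀ a : List Int, (pvRowConv a).getD 0 0 = a.getD 0 0 := fun a => rfl
    have h1 : ∀ a : List Int, (pvRowConv a).getD 1 0 = a.getD 1 0 := fun a => rfl
    have h2 : ∀ a : List Int, (pvRowConv a).getD 2 0 = a.getD 0 0 + a.getD 2 0 := fun a => rfl
    have h3 : ∀ a : List Int, (pvRowConv a).getD 3 0 = a.getD 1 0 - a.getD 3 0 := fun a => rfl
    simp only [Function.comp_def, h0, h1, h2, h3]
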